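-- pv_equiv track=rewrite | github.com/zhaodaolimeng/ai-telemarketing | src/experiments/analysis/export_all_dialogues.py | separate_utterances
-- ===== SOURCE A (Python) =====
-- def separate_utterances(transcript):
--     agent_utterances = []
--     customer_utterances = []
--     for i, turn in enumerate(transcript):
--         speaker = "agent" if i % 2 == 0 else "customer"
--         text = turn.get("text", "").strip()
--         if text:
--             if speaker == "agent":
--                 agent_utterances.append(text)
--             else:
--                 customer_utterances.append(text)
--     return agent_utterances, customer_utterances
-- ===== SOURCE B (Python) =====
-- def separate_utterances(transcript):
--     turns = list(transcript)
--
--     def texts(seq):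
--         return [t for t in (turn.get("text", "").strip() for turn in seq) if t]
--
--     return texts(turns[::2]), texts(turns[1::2])
-- ===== Notes on version B (the rewrite author's own statement) =====
-- stated objective: alternative
-- what changed: Instead of one interleaved enumerate loop with an i%2 speaker branch, B partitions the turns by slicing (turns[::2], turns[1::2]) and builds each utterance list with a separate strip-and-filter comprehension.
import Mathlib
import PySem

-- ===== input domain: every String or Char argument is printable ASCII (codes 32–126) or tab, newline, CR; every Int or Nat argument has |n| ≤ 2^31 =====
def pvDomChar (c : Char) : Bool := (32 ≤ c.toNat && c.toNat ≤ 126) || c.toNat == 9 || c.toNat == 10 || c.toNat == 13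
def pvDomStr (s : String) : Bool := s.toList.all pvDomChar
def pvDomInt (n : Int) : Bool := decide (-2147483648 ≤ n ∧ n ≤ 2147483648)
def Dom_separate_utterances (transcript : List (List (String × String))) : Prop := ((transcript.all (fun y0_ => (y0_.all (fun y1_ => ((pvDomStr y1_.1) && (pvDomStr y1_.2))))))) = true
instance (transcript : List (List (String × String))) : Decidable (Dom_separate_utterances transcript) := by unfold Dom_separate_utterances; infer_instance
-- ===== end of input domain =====

-- B splits the turns by slicing into even/odd halves and filters each with a strip-and-keep pass,
-- instead of A's single interleaved enumerate loop with an i % 2 speaker branch (alternative decomposition).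


-- ===== PORT A =====
def separate_utterances (transcript : List (List (String × String))) : List String × List String :=
  (PySem.List.enumerate transcript 0).foldl
    (fun (acc : List String × List String) p =>
      let speaker := if PySem.Int.mod p.1 2 = 0 then "agent" else "customer"
      let text := PySem.Str.strip ((List.lookup "text" p.2).getD "")
      if text ≠ "" then
        if speaker = "agent" then (acc.1 ++ [text], acc.2) else (acc.1, acc.2 ++ [text])
      else acc)
    ([], [])

-- ===== PORT B =====
-- helper = Source B's inner 'texts' (strip turn.get("text","") over seq, keep non-empty)
def pvGetText (turn : List (String × String)) : String :=
  PySem.Str.strip ((List.lookup "text" turn).getD "")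

def pvTexts (seq : List (List (String × String))) : List String :=
  (seq.map pvGetText).filter (· ≠ "")

def separate_utterances_alt (transcript : List (List (String × String))) : List String × List String :=
  let turns := transcript
  (pvTexts ((PySem.List.slice? turns none none 2).getD []),
   pvTexts ((PySem.List.slice? turns (some 1) none 2).getD []))

-- ===== PRECONDITION & SPEC =====
def Spec_separate_utterances (transcript : List (List (String × String))) (out : List String × List String) : Prop := out = separate_utterances_alt transcript
instance (transcript : List (List (String × String))) (out : List String × List String) : Decidable (Spec_separate_utterances transcript out) := by unfold Spec_separate_utterances; infer_instance

-- ===== CLAIM (what is proved, stated in full; the proofs are below) =====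
def Claim_equal_separate_utterances : Prop := ∀ (transcript : List (List (String × String))), Dom_separate_utterances transcript → Spec_separate_utterances transcript (separate_utterances transcript)

-- ===== LEMMAS AND PROOFS =====

-- every-other-element of a list, starting at the head
def pvEvens {α : Type} : List α → List α
  | [] => []
  | [x] => [x]
  | x :: _ :: xs => x :: pvEvens xs

lemma pv_filterMap_evens {α : Type} (xs : List α) :
    List.filterMap (fun k => xs[2 * k]?) (List.range ((xs.length + 1) / 2)) = pvEvens xs := by
  induction xs using pvEvens.induct with
  | case1 => simp [pvEvens]
  | case2 x => simp [pvEvens]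
  | case3 x y xs ih =>
    have hc : (((x :: y :: xs).length + 1) / 2) = ((xs.length + 1) / 2) + 1 := by
      simp [List.length_cons]; omega
    rw [hc, List.range_succ_eq_map, List.filterMap_cons, List.filterMap_map]
    simp only [Nat.mul_zero, List.getElem?_cons_zero]
    have : (fun k => (x :: y :: xs)[2 * k]?) ∘ (· + 1) = fun k => xs[2 * k]? := by
      funext k
      simp only [Function.comp]
      have : 2 * (k + 1) = 2 * k + 1 + 1 := by ring
      rw [this, List.getElem?_cons_succ, List.getElem?_cons_succ]
    rw [this, ih]
    rfl

lemma pv_slice_even {α : Type} (xs : List α) :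
    PySem.List.slice? xs none none 2 = some (pvEvens xs) := by
  rw [← pv_filterMap_evens]
  unfold PySem.List.slice? PySem.List.sliceIndices
  norm_num
  by_cases h : 0 < xs.length
  · rw [if_pos h]
    have h1 : (((xs.length : Int) + 2 - 1) / 2).toNat = (xs.length + 1) / 2 := by omega
    rw [h1]
    congr 1
  · rw [if_neg h]
    have : xs.length = 0 := by omega
    simp [this]

lemma pv_slice_odd {α : Type} (xs : List α) :
    PySem.List.slice? xs (some 1) none 2 = some (pvEvens xs.tail) := by
  rw [← pv_filterMap_evens]
  unfold PySem.List.slice? PySem.List.sliceIndices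
  norm_num
  rcases xs with _ | ⟨x, t⟩
  · simp
  · have hmin : min (1 : Int) (((x :: t).length : Nat) : Int) = 1 := by
      simp only [List.length_cons]; omega
    rw [hmin]
    by_cases h : 1 < (x :: t).length
    · rw [if_pos h]
      have h1 : (((((x :: t).length : Nat) : Int) - 1 + 2 - 1) / 2).toNat = ((x :: t).length - 1 + 1) / 2 := by
        simp only [List.length_cons]; push_cast; omega
      rw [h1]
      congr 1
      funext k
      have h3 : ((1 : Int) + 2 * (k : Int)).toNat = 2 * k + 1 := by omega
      rw [h3]
    · rw [if_neg h]
      have ht : t.length = 0 := by simp only [List.length_cons] at h; omega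
      rcases List.eq_nil_of_length_eq_zero ht with rfl
      simp

lemma pv_mod_even (m : ℤ) : PySem.Int.mod (2 * m) 2 = 0 := by
  simp [PySem.Int.mod, Int.fmod_eq_emod]

lemma pv_mod_odd (m : ℤ) : PySem.Int.mod (2 * m + 1) 2 = 1 := by
  simp [PySem.Int.mod, Int.fmod_eq_emod]

lemma pvTexts_cons (x : List (String × String)) (l : List (List (String × String))) :
    pvTexts (x :: l) = (if pvGetText x ≠ "" then [pvGetText x] else []) ++ pvTexts l := by
  simp only [pvTexts, List.map_cons, List.filter_cons]
  split_ifs with h <;> simp_all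

lemma pvEvens_cons {α : Type} (y : α) (xs : List α) :
    pvEvens (y :: xs) = y :: pvEvens xs.tail := by
  cases xs <;> rfl

lemma pv_loopA (ts : List (List (String × String))) :
    ∀ (m : ℕ) (acc : List String × List String),
      (PySem.List.enumerate ts (2 * (m : Int))).foldl
        (fun (acc : List String × List String) p =>
          let speaker := if PySem.Int.mod p.1 2 = 0 then "agent" else "customer"
          let text := PySem.Str.strip ((List.lookup "text" p.2).getD "")
          if text ≠ "" then
            if speaker = "agent" then (acc.1 ++ [text], acc.2) else (acc.1, acc.2 ++ [text])
          else acc) acc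
      = (acc.1 ++ pvTexts (pvEvens ts), acc.2 ++ pvTexts (pvEvens ts.tail)) := by
  induction ts using pvEvens.induct with
  | case1 =>
    intro m acc
    simp [PySem.List.enumerate, pvEvens, pvTexts]
  | case2 x =>
    intro m acc
    simp only [PySem.List.enumerate, List.foldl, pvEvens, List.tail, pv_mod_even]
    simp only [pvTexts]
    split_ifs <;> simp_all [pvGetText]
  | case3 x y xs ih =>
    intro m acc
    have hstep : (2 * (m : Int)) + 1 + 1 = 2 * (((m + 1 : ℕ) : Int)) := by push_cast; ring
    have hen : PySem.List.enumerate (x :: y :: xs) (2 * (m : Int)) =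
        (2 * (m : Int), x) :: (2 * (m : Int) + 1, y) :: PySem.List.enumerate xs (2 * ((m + 1 : ℕ) : Int)) := by
      simp [PySem.List.enumerate, hstep]
    rw [hen]
    simp only [List.foldl_cons, pv_mod_even, pv_mod_odd]
    rw [ih (m + 1)]
    simp only [pvEvens, List.tail_cons, pvEvens_cons, pvTexts_cons, pvGetText]
    split_ifs <;> simp_all

-- ===== VERDICT (by name: the statement is the Claim_ definition above) =====
theorem separate_utterances_spec : Claim_equal_separate_utterances := by
  intro ts _
  unfold Spec_separate_utterances separate_utterances separate_utterances_alt
  simp only [pv_slice_even, pv_slice_odd, Option.getD_some]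
  have h := pv_loopA ts 0 ([], [])
  simpa using h
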